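-- pv_equiv track=rewrite | github.com/boomhaa/basis-of-informatics | hw/hw7/dictionary_utils.py | _get_words_from_line
-- ===== SOURCE A (Python) =====
-- def _is_word_part(char):
-- 	return char.isalpha() or char.isdigit() or char in ('`', '\'', '’', '-')
--
-- def _get_words_from_line(line):
-- 	word_start = -1
-- 	word = ''
--
-- 	for i, char in enumerate(line, 1):
--
-- 		if _is_word_part(char):
-- 			word += char
-- 			if word_start == -1:
-- 				word_start = i
--
-- 		elif word_start != -1:
-- 			yield word_start, word
-- 			word_start = -1
-- 			word = ''
--
-- 	if word_start != -1:
-- 		yield word_start, word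
-- ===== SOURCE B (Python) =====
-- def _is_word_part(char):
-- 	return char.isalpha() or char.isdigit() or char in ('`', '\'', '’', '-')
--
-- def _get_words_from_line(line):
-- 	# scan by runs: locate each maximal run of word characters and slice it out
-- 	n = len(line)
-- 	i = 0
-- 	while i < n:
-- 		if _is_word_part(line[i]):
-- 			j = i + 1
-- 			while j < n and _is_word_part(line[j]):
-- 				j += 1
-- 			yield i + 1, line[i:j]
-- 			i = j
-- 		else:
-- 			i += 1
-- ===== Notes on version B (the rewrite author's own statement) =====
-- stated objective: alternative
-- what changed: Replaced the char-by-char state machine (accumulating word and word_start flags) with an index-based run scanner that finds each maximal run of word characters and yields it via a single slice.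
import Mathlib
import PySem

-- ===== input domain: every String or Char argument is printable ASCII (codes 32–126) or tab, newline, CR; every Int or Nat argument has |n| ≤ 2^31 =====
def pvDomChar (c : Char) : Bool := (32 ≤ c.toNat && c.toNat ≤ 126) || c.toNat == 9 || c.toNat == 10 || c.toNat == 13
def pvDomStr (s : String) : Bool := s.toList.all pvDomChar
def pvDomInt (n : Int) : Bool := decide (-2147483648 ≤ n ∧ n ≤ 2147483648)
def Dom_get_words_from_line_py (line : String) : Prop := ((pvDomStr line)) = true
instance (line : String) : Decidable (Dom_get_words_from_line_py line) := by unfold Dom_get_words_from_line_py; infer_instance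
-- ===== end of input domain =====

-- B changes the algorithm: an index-based maximal-run scanner with slicing instead of
-- A's char-by-char state machine accumulating (word_start, word); same cost, no speed claim.

-- ===== PORT A =====
-- _is_word_part: isalpha/isdigit are exact on the ASCII domain via PySem.Chars
def isWordPartPy (c : Char) : Bool :=
  PySem.Chars.isalpha c || PySem.Chars.isdigit c ||
    (c == '`' || c == '\'' || c == '’' || c == '-')

-- the for-loop over enumerate(line, 1); word kept as List Char (Python str = list of chars)
def aLoopPy : List Char → Nat → Int → List Char → List (Int × String)
  | [], _, ws, w => if ws ≠ -1 then [(ws, String.ofList w)] else []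
  | c :: cs, i, ws, w =>
    if isWordPartPy c then
      aLoopPy cs (i + 1) (if ws == -1 then (i : Int) else ws) (w ++ [c])
    else if ws ≠ -1 then
      (ws, String.ofList w) :: aLoopPy cs (i + 1) (-1) []
    else
      aLoopPy cs (i + 1) ws w

def get_words_from_line_py (line : String) : List (Int × String) :=
  aLoopPy line.toList 1 (-1) []

-- ===== PORT B =====
-- inner while loop: advance j while j < n and line[j] is a word char
def bInner (s : List Char) (n : Nat) (j : Nat) : Nat :=
  if j < n ∧ isWordPartPy (s.getD j ' ') then bInner s n (j + 1) else j
termination_by n - j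
decreasing_by omega

theorem bInner_ge (s : List Char) (n j : Nat) : j ≤ bInner s n j := by
  unfold bInner
  split
  · have := bInner_ge s n (j + 1); omega
  · exact le_refl j
termination_by n - j
decreasing_by rename_i h; omega

-- outer while loop over the index i; line[i:j] is (s.drop i).take (j - i)
def bOuter (s : List Char) (n : Nat) (i : Nat) : List (Int × String) :=
  if h : i < n then
    if hw : isWordPartPy (s.getD i ' ') then
      ((i : Int) + 1, String.ofList ((s.drop i).take (bInner s n (i + 1) - i))) ::
        bOuter s n (bInner s n (i + 1))
    else
      bOuter s n (i + 1)
  else []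
termination_by n - i
decreasing_by
  · have := bInner_ge s n (i + 1); omega
  · omega

def get_words_from_line_py_alt (line : String) : List (Int × String) :=
  bOuter line.toList line.toList.length 0

-- ===== PRECONDITION & SPEC =====
def Spec_get_words_from_line_py (line : String) (out : List (Int × String)) : Prop := out = get_words_from_line_py_alt line
instance (line : String) (out : List (Int × String)) : Decidable (Spec_get_words_from_line_py line out) := by unfold Spec_get_words_from_line_py; infer_instance

-- ===== CLAIM (what is proved, stated in full; the proofs are below) =====
def Claim_equal_get_words_from_line_py : Prop := ∀ (line : String), Dom_get_words_from_line_py line → Spec_get_words_from_line_py line (get_words_from_line_py line)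

-- ===== LEMMAS AND PROOFS =====

-- intermediate form: maximal-run decomposition by structural recursion on the suffix
def runsPy : List Char → Nat → List (Int × String)
  | [], _ => []
  | c :: cs, pos =>
    if isWordPartPy c then
      ((pos : Int), String.ofList (c :: cs.takeWhile isWordPartPy)) ::
        runsPy (cs.dropWhile isWordPartPy) (pos + 1 + (cs.takeWhile isWordPartPy).length)
    else
      runsPy cs (pos + 1)
termination_by cs _ => cs.length
decreasing_by
  · have := List.length_dropWhile_le (p := isWordPartPy) (l := cs); simpa using Nat.lt_succ_of_le this
  · simp

-- bInner computes the end of the maximal run starting at j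
theorem bInner_eq (s : List Char) (j : Nat) (hj : j ≤ s.length) :
    bInner s s.length j = j + ((s.drop j).takeWhile isWordPartPy).length := by
  unfold bInner
  rcases Nat.lt_or_ge j s.length with h | h
  · have hdrop : s.drop j = s.getD j ' ' :: s.drop (j + 1) := by
      rw [List.getD_eq_getElem?_getD, List.getElem?_eq_getElem h]
      simpa using (List.drop_eq_getElem_cons h).symm
    by_cases hw : isWordPartPy (s.getD j ' ')
    · rw [if_pos ⟨h, hw⟩, bInner_eq s (j + 1) (by omega), hdrop,
        List.takeWhile_cons_of_pos hw]
      simp; omega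
    · rw [if_neg (by tauto), hdrop, List.takeWhile_cons_of_neg hw]
      simp
  · have : s.drop j = [] := List.drop_eq_nil_of_le h
    rw [this, if_neg (by omega)]
    simp
termination_by s.length - j
decreasing_by omega

theorem takeWhile_len_le (p : Char → Bool) (l : List Char) :
    (l.takeWhile p).length ≤ l.length := by
  simpa using (List.takeWhile_prefix p (l := l)).length_le

theorem take_takeWhile_len {P : Char → Bool} (l : List Char) :
    l.take (l.takeWhile P).length = l.takeWhile P := by
  have h := List.takeWhile_prefix (l := l) (p := P)
  exact (List.prefix_iff_eq_take.mp h).symm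

-- drop past the takeWhile prefix is dropWhile
theorem dropWhile_eq_drop_len (p : Char → Bool) (l : List Char) :
    l.drop (l.takeWhile p).length = l.dropWhile p := by
  induction l with
  | nil => simp
  | cons c cs ih =>
    by_cases hc : p c
    · rw [List.takeWhile_cons_of_pos hc, List.dropWhile_cons_of_pos hc,
        List.length_cons, List.drop_succ_cons]
      exact ih
    · rw [List.takeWhile_cons_of_neg hc, List.dropWhile_cons_of_neg hc]
      simp

-- B's index loop computes the run decomposition of the remaining suffix
theorem bOuter_eq_runs (s : List Char) (i : Nat) (hi : i ≤ s.length) :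
    bOuter s s.length i = runsPy (s.drop i) (i + 1) := by
  unfold bOuter
  rcases Nat.lt_or_ge i s.length with h | h
  · have hdrop : s.drop i = s.getD i ' ' :: s.drop (i + 1) := by
      rw [List.getD_eq_getElem?_getD, List.getElem?_eq_getElem h]
      simpa using (List.drop_eq_getElem_cons h).symm
    by_cases hw : isWordPartPy (s.getD i ' ')
    · rw [dif_pos h, dif_pos hw]
      have hin := bInner_eq s (i + 1) (by omega)
      have hlen := takeWhile_len_le isWordPartPy (s.drop (i + 1))
      simp only [List.length_drop] at hlen
      rw [hin]
      have hhd : (s.drop i).take (i + 1 + ((s.drop (i + 1)).takeWhile isWordPartPy).length - i)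
          = s.getD i ' ' :: ((s.drop (i + 1)).takeWhile isWordPartPy) := by
        rw [hdrop]
        have he : i + 1 + ((s.drop (i + 1)).takeWhile isWordPartPy).length - i
            = ((s.drop (i + 1)).takeWhile isWordPartPy).length + 1 := by omega
        rw [he, List.take_succ_cons, take_takeWhile_len]
      have hdw : s.drop (i + 1 + ((s.drop (i + 1)).takeWhile isWordPartPy).length)
          = (s.drop (i + 1)).dropWhile isWordPartPy := by
        have hc : i + 1 + ((s.drop (i + 1)).takeWhile isWordPartPy).length
            = (i + 1) + ((s.drop (i + 1)).takeWhile isWordPartPy).length := by omega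
        rw [hc, ← List.drop_drop, dropWhile_eq_drop_len]
      rw [hhd, bOuter_eq_runs s (i + 1 + ((s.drop (i + 1)).takeWhile isWordPartPy).length)
            (by omega),
        hdw, hdrop, runsPy, if_pos hw]
      have harg : i + 1 + ((s.drop (i + 1)).takeWhile isWordPartPy).length + 1
          = i + 1 + 1 + ((s.drop (i + 1)).takeWhile isWordPartPy).length := by omega
      rw [harg]
      push_cast
      rfl
    · rw [dif_pos h, dif_neg hw, hdrop, runsPy, if_neg hw]
      exact bOuter_eq_runs s (i + 1) (by omega)
  · have hd : s.drop i = [] := List.drop_eq_nil_of_le h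
    rw [dif_neg (by omega), hd, runsPy]
termination_by s.length - i
decreasing_by
  · omega
  · omega

-- A's state machine equals the run decomposition: proved in both states at once
theorem aLoop_eq_runs (s : List Char) :
    (∀ (i : Nat), aLoopPy s i (-1) [] = runsPy s i) ∧
    (∀ (i : Nat) (ws : Int) (w : List Char), ws ≠ -1 →
      aLoopPy s i ws w
        = (ws, String.ofList (w ++ s.takeWhile isWordPartPy)) ::
            runsPy (s.dropWhile isWordPartPy) (i + (s.takeWhile isWordPartPy).length)) := by
  induction s with
  | nil =>
    constructor
    · intro i; simp [aLoopPy, runsPy]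
    · intro i ws w hws; simp [aLoopPy, runsPy, hws]
  | cons c cs ih =>
    obtain ⟨ih1, ih2⟩ := ih
    constructor
    · intro i
      by_cases hw : isWordPartPy c
      · rw [aLoopPy, if_pos hw]
        simp only [beq_self_eq_true, if_true]
        rw [ih2 (i + 1) (i : Int) ([] ++ [c]) (by omega), runsPy, if_pos hw]
        simp
      · rw [aLoopPy, if_neg hw, if_neg (by simp), runsPy, if_neg hw]
        exact ih1 (i + 1)
    · intro i ws w hws
      by_cases hw : isWordPartPy c
      · rw [aLoopPy, if_pos hw]
        have hne : (ws == -1) = false := by simp [hws]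
        rw [hne]
        simp only [Bool.false_eq_true, if_false]
        rw [ih2 (i + 1) ws (w ++ [c]) hws, List.takeWhile_cons_of_pos hw,
          List.dropWhile_cons_of_pos hw]
        simp only [List.length_cons]
        have harg : i + 1 + (cs.takeWhile isWordPartPy).length
            = i + ((cs.takeWhile isWordPartPy).length + 1) := by omega
        rw [harg]
        simp
      · rw [aLoopPy, if_neg hw, if_pos hws, ih1 (i + 1),
          List.takeWhile_cons_of_neg hw, List.dropWhile_cons_of_neg hw]
        simp [runsPy, hw]

-- ===== VERDICT (by name: the statement is the Claim_ definition above) =====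
theorem get_words_from_line_py_spec : Claim_equal_get_words_from_line_py := by
  intro line _
  unfold Spec_get_words_from_line_py get_words_from_line_py get_words_from_line_py_alt
  rw [(aLoop_eq_runs line.toList).1 1, bOuter_eq_runs line.toList 0 (by omega)]
  simp
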